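-- pv_equiv track=rewrite | github.com/vennapusasreeteja/opensource | visa_prep/ram's absence streak.py | max_consecutive_absent_days
-- ===== SOURCE A (Python) =====
-- def max_consecutive_absent_days(N,attendance):
--     max_absent=0
--     current_absent=0
--     for i in range(N):
--         if attendance[i]==0:
--             current_absent += 1
--         else:
--             max_absent = max(max_absent, current_absent)
--             current_absent = 0
--     max_absent = max(max_absent, current_absent)
--     return max_absent
-- ===== SOURCE B (Python) =====
-- def max_consecutive_absent_days(N, attendance):
--     xs = attendance[:max(N, 0)]
--     bounds = [-1] + [i for i, x in enumerate(xs) if x != 0] + [len(xs)]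
--     return max(b - a - 1 for a, b in zip(bounds, bounds[1:]))
-- ===== Notes on version B (the rewrite author's own statement) =====
-- stated objective: alternative
-- what changed: B slices the first N days and takes the maximum gap between consecutive non-zero positions delimited by -1/len sentinels, instead of A's running-streak counter indexing over range(N).
import Mathlib
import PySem

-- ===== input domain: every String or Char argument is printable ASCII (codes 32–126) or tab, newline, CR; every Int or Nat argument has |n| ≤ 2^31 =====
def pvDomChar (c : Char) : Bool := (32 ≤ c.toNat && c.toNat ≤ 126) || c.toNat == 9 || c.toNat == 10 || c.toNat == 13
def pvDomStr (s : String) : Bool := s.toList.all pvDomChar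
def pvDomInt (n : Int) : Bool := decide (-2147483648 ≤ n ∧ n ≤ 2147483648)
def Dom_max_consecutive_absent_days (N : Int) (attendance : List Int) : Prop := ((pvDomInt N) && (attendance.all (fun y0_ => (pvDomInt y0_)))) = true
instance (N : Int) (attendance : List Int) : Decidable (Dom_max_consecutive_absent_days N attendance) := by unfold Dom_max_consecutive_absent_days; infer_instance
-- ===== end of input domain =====

-- B computes the answer as the maximum gap between consecutive non-zero positions of the
-- first-N slice (with -1/len sentinels) instead of A's running-streak counter: alternative algorithm.

-- ===== PORT A =====
def max_consecutive_absent_days (N : Int) (attendance : List Int) : Int :=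
  let s := (PySem.List.pyRange 0 N 1).foldl
    (fun (s : Int × Int) (i : Int) =>
      if PySem.List.pyGetD attendance i 0 == 0 then (s.1, s.2 + 1)
      else (max s.1 s.2, 0)) (0, 0)
  max s.1 s.2

-- ===== PORT B =====
def max_consecutive_absent_days_alt (N : Int) (attendance : List Int) : Int :=
  let xs := PySem.List.slice attendance none (some (max N 0))
  let bounds : List Int :=
    -1 :: (((PySem.List.enumerate xs 0).filter (fun p => !(p.2 == 0))).map (·.1)) ++ [(xs.length : Int)]
  let gaps := (bounds.zip bounds.tail).map (fun p => p.2 - p.1 - 1)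
  match gaps with
  | [] => 0            -- unreachable: bounds has at least two elements
  | h :: t => t.foldl max h

-- ===== PRECONDITION & SPEC =====
-- Pre_ excludes exactly the inputs where A raises IndexError: N > len(attendance).
def Pre_max_consecutive_absent_days (N : Int) (attendance : List Int) : Prop :=
  N ≤ (attendance.length : Int)
instance (N : Int) (attendance : List Int) : Decidable (Pre_max_consecutive_absent_days N attendance) := by
  unfold Pre_max_consecutive_absent_days; infer_instance
def pvWitness_max_consecutive_absent_days : Int × List Int := (3, [0, 1, 0])

def Spec_max_consecutive_absent_days (N : Int) (attendance : List Int) (out : Int) : Prop := out = max_consecutive_absent_days_alt N attendance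
instance (N : Int) (attendance : List Int) (out : Int) : Decidable (Spec_max_consecutive_absent_days N attendance out) := by unfold Spec_max_consecutive_absent_days; infer_instance

-- ===== CLAIM (what is proved, stated in full; the proofs are below) =====
def Claim_equal_max_consecutive_absent_days : Prop := ∀ (N : Int) (attendance : List Int), Dom_max_consecutive_absent_days N attendance → Pre_max_consecutive_absent_days N attendance → Spec_max_consecutive_absent_days N attendance (max_consecutive_absent_days N attendance)

-- ===== LEMMAS AND PROOFS =====

-- longest zero-run of xs when a run of length c is already open
def pvM : List Int → Int → Int
  | [], c => c
  | x :: t, c => if x = 0 then pvM t (c + 1) else max c (pvM t 0)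

lemma pvM_ge (xs : List Int) (c : Int) : c ≤ pvM xs c := by
  induction xs generalizing c with
  | nil => simp [pvM]
  | cons x t ih =>
    simp only [pvM]
    split_ifs
    · exact le_trans (by omega) (ih (c + 1))
    · exact le_max_left _ _

lemma pvFoldA (xs : List Int) (m c : Int) :
    max ((xs.foldl (fun (s : Int × Int) (x : Int) =>
        if x = 0 then (s.1, s.2 + 1) else (max s.1 s.2, 0)) (m, c)).1)
      ((xs.foldl (fun (s : Int × Int) (x : Int) =>
        if x = 0 then (s.1, s.2 + 1) else (max s.1 s.2, 0)) (m, c)).2)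
      = max m (pvM xs c) := by
  induction xs generalizing m c with
  | nil => simp [pvM]
  | cons x t ih =>
    simp only [List.foldl_cons, pvM]
    by_cases h : x = 0
    · rw [if_pos h, if_pos h]
      exact ih m (c + 1)
    · rw [if_neg h, if_neg h, ih (max m c) 0, max_assoc]

-- nonzero positions of xs, offset by k
def pvE : Int → List Int → List Int
  | _, [] => []
  | k, x :: t => if x = 0 then pvE (k + 1) t else k :: pvE (k + 1) t

lemma pvE_enum (xs : List Int) (k : Int) :
    (((PySem.List.enumerate xs k).filter (fun p => !(p.2 == 0))).map (·.1)) = pvE k xs := by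
  induction xs generalizing k with
  | nil => simp [PySem.List.enumerate_nil, pvE]
  | cons x t ih =>
    simp only [PySem.List.enumerate_cons, List.filter_cons, pvE]
    by_cases h : x = 0
    · simp [h, ih]
    · simp [h, ih]

def pvMaxOf : List Int → Int
  | [] => 0
  | h :: t => t.foldl max h

def pvGaps (l : List Int) : List Int := (l.zip l.tail).map (fun p => p.2 - p.1 - 1)

lemma pvGaps_cons₂ (a b : Int) (l : List Int) :
    pvGaps (a :: b :: l) = (b - a - 1) :: pvGaps (b :: l) := by
  simp [pvGaps]

lemma pvFoldl_max_max (t : List Int) (a b : Int) :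
    t.foldl max (max a b) = max a (t.foldl max b) := by
  induction t generalizing b with
  | nil => simp
  | cons c t ih => simp only [List.foldl_cons, max_assoc]; exact ih (max b c)

lemma pvMaxOf_cons₂ (a b : Int) (l : List Int) :
    pvMaxOf (a :: b :: l) = max a (pvMaxOf (b :: l)) := by
  simp only [pvMaxOf, List.foldl_cons]
  exact pvFoldl_max_max l a b

lemma pvGapsMax (xs : List Int) (p k : Int) :
    pvMaxOf (pvGaps (p :: pvE k xs ++ [k + (xs.length : Int)])) = pvM xs (k - p - 1) := by
  induction xs generalizing p k with
  | nil =>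
    simp [pvE, pvGaps, pvMaxOf, pvM]
  | cons x t ih =>
    simp only [pvE, pvM, List.length_cons]
    have hc : k + (((t.length + 1 : Nat)) : Int) = (k + 1) + (t.length : Int) := by
      push_cast; ring
    by_cases h : x = 0
    · rw [if_pos h, if_pos h, hc, ih p (k + 1)]
      congr 1
      omega
    · rw [if_neg h, if_neg h, List.cons_append, List.cons_append, hc, pvGaps_cons₂]
      obtain ⟨b, l, hb⟩ : ∃ b l, pvE (k + 1) t ++ [(k + 1) + (t.length : Int)] = b :: l := by
        cases hx : pvE (k + 1) t ++ [(k + 1) + (t.length : Int)] with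
        | nil => simp at hx
        | cons b l => exact ⟨b, l, rfl⟩
      rw [hb, pvGaps_cons₂, pvMaxOf_cons₂, ← pvGaps_cons₂, ← hb, ← List.cons_append, ih k (k + 1)]
      norm_num

-- B, rewritten through pvM
lemma pvAltEq (N : Int) (attendance : List Int) :
    max_consecutive_absent_days_alt N attendance
      = pvM (PySem.List.slice attendance none (some (max N 0))) 0 := by
  have key := pvGapsMax (PySem.List.slice attendance none (some (max N 0))) (-1) 0
  rw [show (0 : Int) - (-1) - 1 = 0 from by ring, zero_add] at key
  simp only [max_consecutive_absent_days_alt, pvE_enum]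
  exact key

-- ===== VERDICT (by name: the statement is the Claim_ definition above) =====
theorem max_consecutive_absent_days_spec : Claim_equal_max_consecutive_absent_days := by
  intro N attendance _ hPre
  unfold Spec_max_consecutive_absent_days
  rw [pvAltEq]
  unfold max_consecutive_absent_days
  simp only [beq_iff_eq]
  by_cases hN : 0 ≤ N
  · have hsl : PySem.List.slice attendance none (some (max N 0)) = attendance.take N.toNat := by
      rw [show max N 0 = N from by omega]
      exact PySem.List.slice_to attendance hN
    rw [hsl]
    have hlen : (((attendance.take N.toNat).length : Nat) : Int) = N := by
      have hle : N.toNat ≤ attendance.length := by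
        unfold Pre_max_consecutive_absent_days at hPre; omega
      rw [List.length_take]
      omega
    conv_lhs => rw [← hlen]
    rw [PySem.List.foldl_congr_mem _ _
        (fun (s : Int × Int) (i : Int) =>
          (fun (s : Int × Int) (x : Int) => if x = 0 then (s.1, s.2 + 1) else (max s.1 s.2, 0)) s
            (PySem.List.pyGetD (attendance.take N.toNat) i 0)) _
        (by
          intro acc i hi
          have hi' := PySem.List.mem_pyRange_one.1 hi
          have h2 : i < (attendance.length : Int) := by
            unfold Pre_max_consecutive_absent_days at hPre; omega
          simp only []
          rw [PySem.List.pyGetD_eq_getElem _ _ hi'.1 hi'.2,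
              PySem.List.pyGetD_eq_getElem _ _ hi'.1 h2]
          simp [List.getElem_take])]
    rw [PySem.List.foldl_pyRange_zero_pyGetD' (attendance.take N.toNat) (0 : Int)
        (fun (s : Int × Int) (x : Int) => if x = 0 then (s.1, s.2 + 1) else (max s.1 s.2, 0))
        ((0, 0) : Int × Int)]
    rw [pvFoldA (attendance.take N.toNat) 0 0]
    have := pvM_ge (attendance.take N.toNat) 0
    omega
  · rw [show max N 0 = 0 from by omega,
        PySem.List.slice_to attendance (le_refl (0 : Int)),
        PySem.List.pyRange_one_eq_nil (by omega : N ≤ 0)]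
    simp [pvM]
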